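-- pv_equiv track=rewrite | github.com/JakubKazimierski/PythonPortfolio | ChangingSequence/ChangingSequenceBetter.py | ChangingSequence
-- ===== SOURCE A (Python) =====
-- def ChangingSequence(arr):
--     '''
--     Have the function ChangingSequence(arr)
--     take the array of numbers stored in arr
--     and return the index at which the numbers stop increasing
--     and begin decreasing or stop decreasing
--     and begin increasing. For example: if arr is [1, 2, 4, 6, 4, 3, 1]
--     then your program should return 3 because 6 is the last point
--     in the array where the numbers were increasing and the next number
--     begins a decreasing sequence. The array will contain at least 3 numbers
--     and it may contains only a single sequence, increasing or decreasing.
--     If there is only a single sequence in the array,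
--     then your program should return -1.
--     Indexing should begin with 0.
--     '''
--
--     #Below asserts type of input and asserts that input is not empty
--     if len(arr) > 0:
--         for i in arr:
--             if type(i) != int:
--                 return "Wrong Input Type"
--     else:
--         return "Input is empty"
--
--     #Default iteration has came to end of array
--     index = -1
--
--     #Below makes range from 1 to len(arr)-1 in order to check 3 values at once
--     for j in range(1, len(arr) - 1, 1):
--         #First condition is for increasing sequence and second is for decreasing
--         #Backslash below is treated as extension of line
--         if arr[j-1] < arr[j] and arr[j] > arr[j+1] or \
--             arr[j-1] > arr[j] and arr[j] < arr[j+1]: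
--             #Below assigns index where sequence stopped increasing or decreasing
--             index = j
--
--     #If none of cases had place, index is -1 because it means whole array was traversed
--     return index
-- ===== SOURCE B (Python) =====
-- def ChangingSequence(arr):
--     if len(arr) == 0:
--         return "Input is empty"
--     for i in arr:
--         if type(i) != int:
--             return "Wrong Input Type"
--     # sign of each consecutive difference: 1 rising, -1 falling, 0 tie
--     signs = [(x < y) - (y < x) for x, y in zip(arr, arr[1:])]
--     index = -1
--     for j in range(1, len(signs)):
--         if signs[j - 1] * signs[j] == -1:
--             index = j
--     return index
-- ===== Notes on version B (the rewrite author's own statement) =====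
-- stated objective: alternative
-- what changed: Replaces A's three-way window comparison per index with a two-phase decomposition: first map consecutive pairs to difference signs (+1/0/-1), then keep the last position where adjacent signs multiply to -1 (an opposite-direction turn).
-- outside the precondition, e.g. on ChangingSequence([]): A returns 'Input is empty', B returns 'Input is empty'
import Mathlib
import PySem

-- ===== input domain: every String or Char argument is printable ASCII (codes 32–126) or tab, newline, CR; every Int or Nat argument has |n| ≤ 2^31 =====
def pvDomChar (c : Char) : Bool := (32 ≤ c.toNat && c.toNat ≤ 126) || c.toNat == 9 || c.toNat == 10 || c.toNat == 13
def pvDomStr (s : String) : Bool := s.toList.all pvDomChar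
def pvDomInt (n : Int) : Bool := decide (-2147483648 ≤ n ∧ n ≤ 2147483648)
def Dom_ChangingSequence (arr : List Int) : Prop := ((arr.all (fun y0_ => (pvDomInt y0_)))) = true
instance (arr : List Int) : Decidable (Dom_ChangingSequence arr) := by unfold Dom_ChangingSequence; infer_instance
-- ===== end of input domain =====

-- B recomputes the result in two phases (consecutive difference signs, then last adjacent
-- opposite-sign pair) instead of A's one three-way window comparison per index; same cost.

-- ===== PORT A =====
-- pyGetD with default 0 is exact here: every index j-1, j, j+1 with j ∈ range(1, len-1)
-- is in range, so the default is never consulted.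
def ChangingSequence (arr : List Int) : Int :=
  (PySem.List.pyRange 1 ((arr.length : Int) - 1) 1).foldl
    (fun index j =>
      if (PySem.List.pyGetD arr (j - 1) 0 < PySem.List.pyGetD arr j 0 ∧
          PySem.List.pyGetD arr j 0 > PySem.List.pyGetD arr (j + 1) 0) ∨
         (PySem.List.pyGetD arr (j - 1) 0 > PySem.List.pyGetD arr j 0 ∧
          PySem.List.pyGetD arr j 0 < PySem.List.pyGetD arr (j + 1) 0)
      then j else index) (-1)

-- ===== PORT B =====
def ChangingSequence_alt (arr : List Int) : Int :=
  let signs := (arr.zip (PySem.List.slice arr (some 1) none)).map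
    (fun p => (if p.1 < p.2 then (1 : Int) else 0) - (if p.2 < p.1 then 1 else 0))
  (PySem.List.pyRange 1 (signs.length : Int) 1).foldl
    (fun index j =>
      if PySem.List.pyGetD signs (j - 1) 0 * PySem.List.pyGetD signs j 0 = -1
      then j else index) (-1)

-- ===== PRECONDITION & SPEC =====
-- Pre_ excludes only the empty list, on which Python A returns the string "Input is empty",
-- not an int (both Pythons return that same string there).
def Pre_ChangingSequence (arr : List Int) : Prop := arr ≠ []
instance (arr : List Int) : Decidable (Pre_ChangingSequence arr) := by unfold Pre_ChangingSequence; infer_instance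
def pvWitness_ChangingSequence : List Int := [1, 2, 1]

def Spec_ChangingSequence (arr : List Int) (out : Int) : Prop := out = ChangingSequence_alt arr
instance (arr : List Int) (out : Int) : Decidable (Spec_ChangingSequence arr out) := by unfold Spec_ChangingSequence; infer_instance

-- ===== CLAIM (what is proved, stated in full; the proofs are below) =====
def Claim_equal_ChangingSequence : Prop := ∀ (arr : List Int), Dom_ChangingSequence arr → Pre_ChangingSequence arr → Spec_ChangingSequence arr (ChangingSequence arr)

-- ===== LEMMAS AND PROOFS =====

-- consecutive-difference sign at position k agrees with the three-way comparison
theorem pv_turn_iff (a b c : Int) :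
    (((if a < b then (1 : Int) else 0) - (if b < a then 1 else 0)) *
     ((if b < c then (1 : Int) else 0) - (if c < b then 1 else 0)) = -1)
    ↔ ((a < b ∧ b > c) ∨ (a > b ∧ b < c)) := by
  split_ifs <;> omega

-- ===== VERDICT (by name: the statement is the Claim_ definition above) =====
theorem ChangingSequence_spec : Claim_equal_ChangingSequence := by
  intro arr _ hpre
  show ChangingSequence arr = ChangingSequence_alt arr
  have hpos : 0 < arr.length := List.length_pos_of_ne_nil hpre
  unfold ChangingSequence ChangingSequence_alt
  rw [PySem.List.slice_from arr (by norm_num)]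
  dsimp only
  simp only [Int.toNat_one, List.length_map, List.length_zip, List.length_drop]
  have hm : ((min arr.length (arr.length - 1) : Nat) : Int) = (arr.length : Int) - 1 := by
    omega
  rw [hm]
  refine (PySem.List.foldl_congr_mem _ _ _ _ ?_).symm
  intro acc j hj
  rw [PySem.List.mem_pyRange_one] at hj
  obtain ⟨h1, h2⟩ := hj
  have hj0 : 0 ≤ j - 1 := by omega
  have hbl : (j + 1 : Int) < (arr.length : Int) := by omega
  have hzl : ((arr.zip (arr.drop 1)).map
      (fun p => (if p.1 < p.2 then (1 : Int) else 0) - (if p.2 < p.1 then 1 else 0))).length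
      = arr.length - 1 := by
    simp only [List.length_map, List.length_zip, List.length_drop]; omega
  simp only [PySem.List.pyGetD_eq_getElem _ _ hj0 (by rw [hzl]; omega),
      PySem.List.pyGetD_eq_getElem _ _ (le_trans hj0 (by omega) : (0:Int) ≤ j) (by rw [hzl]; omega),
      PySem.List.pyGetD_eq_getElem arr (i := j - 1) _ hj0 (by omega),
      PySem.List.pyGetD_eq_getElem arr (i := j) _ (by omega) (by omega),
      PySem.List.pyGetD_eq_getElem arr (i := j + 1) _ (by omega) hbl]
  have hk1 : 1 + (j - 1).toNat = j.toNat := by omega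
  have hk3 : 1 + j.toNat = j.toNat + 1 := by omega
  have hk2 : (j + 1).toNat = j.toNat + 1 := by omega
  simp only [List.getElem_map, List.getElem_zip, List.getElem_drop, hk1, hk3, hk2]
  by_cases hc : arr[(j-1).toNat] < arr[j.toNat] ∧ arr[j.toNat] > arr[j.toNat + 1] ∨
      arr[(j-1).toNat] > arr[j.toNat] ∧ arr[j.toNat] < arr[j.toNat + 1]
  · rw [if_pos ((pv_turn_iff _ _ _).mpr hc), if_pos hc]
  · rw [if_neg (fun h => hc ((pv_turn_iff _ _ _).mp h)), if_neg hc]
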